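-- pv_equiv track=rewrite | github.com/YegorVasilenko/MIPT-programming-course-3 | seminar 9/matrix_multiplication.py | proc_row
-- ===== SOURCE A (Python) =====
-- def scalar_product(a, b):
--     res = 0
--     for i in range(len(a)):
--         res += a[i] * b[i]
--     return res
--
-- def get_row(M, i):
--     return M[i]
--
-- def get_column(M, j):
--     res = []
--     for i in range(len(M)):
--         res.append(M[i][j])
--     return res
--
-- def proc_row(x):
--     A, B, i = x[0], x[1], x[2]
--     res = []
--     for j in range(len(B[0])):
--         res.append(scalar_product(
--                     get_row(A, i),
--                     get_column(B, j))
--                 )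
--     return res
-- ===== SOURCE B (Python) =====
-- def proc_row(x):
--     A, B, i = x[0], x[1], x[2]
--     row = A[i]
--     res = [0] * len(B[0])
--     for k in range(len(row)):
--         rk = row[k]
--         Bk = B[k]
--         for j in range(len(res)):
--             res[j] += rk * Bk[j]
--     return res
-- ===== Notes on version B (the rewrite author's own statement) =====
-- stated objective: alternative
-- what changed: B computes the result row as an accumulator list updated in place (res[j] += A[i][k]*B[k][j] over k then j), instead of A's per-column extraction (get_column) followed by a dot product per output entry; no helper functions and no column lists are built.
-- outside the precondition, e.g. on proc_row(([[1]], [[]], 5)): A returns [], B raises IndexError; on proc_row(([[1, 2]], [[]], 0)): A returns [], B raises IndexError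
import Mathlib
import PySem

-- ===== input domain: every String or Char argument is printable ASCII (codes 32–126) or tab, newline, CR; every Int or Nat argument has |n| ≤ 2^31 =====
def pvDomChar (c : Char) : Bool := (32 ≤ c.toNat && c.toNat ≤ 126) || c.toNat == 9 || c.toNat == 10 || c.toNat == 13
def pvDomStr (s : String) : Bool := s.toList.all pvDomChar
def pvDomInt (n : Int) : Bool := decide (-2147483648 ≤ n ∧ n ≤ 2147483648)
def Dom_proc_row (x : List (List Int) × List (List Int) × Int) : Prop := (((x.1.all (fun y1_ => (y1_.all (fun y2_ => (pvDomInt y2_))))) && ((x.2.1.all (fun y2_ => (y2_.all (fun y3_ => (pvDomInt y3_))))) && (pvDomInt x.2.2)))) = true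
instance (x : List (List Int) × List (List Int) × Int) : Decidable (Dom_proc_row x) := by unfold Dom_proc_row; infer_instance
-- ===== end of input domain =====

-- B re-implements proc_row as a row-times-matrix accumulation (one accumulator list updated per k)
-- instead of A's per-column extraction plus dot product; objective: alternative decomposition, same cost.

-- ===== PORT A =====
def scalar_product (a b : List Int) : Int :=
  (PySem.List.pyRange 0 a.length 1).foldl
    (fun res i => res + PySem.List.pyGetD a i 0 * PySem.List.pyGetD b i 0) 0

def get_row (M : List (List Int)) (i : Int) : List Int :=
  PySem.List.pyGetD M i []

def get_column (M : List (List Int)) (j : Int) : List Int :=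
  (PySem.List.pyRange 0 M.length 1).foldl
    (fun res i => res ++ [PySem.List.pyGetD (PySem.List.pyGetD M i []) j 0]) []

def proc_row (x : List (List Int) × List (List Int) × Int) : List Int :=
  let A := x.1; let B := x.2.1; let i := x.2.2
  (PySem.List.pyRange 0 (PySem.List.pyGetD B 0 []).length 1).foldl
    (fun res j => res ++ [scalar_product (get_row A i) (get_column B j)]) []

-- ===== PORT B =====
def proc_row_alt (x : List (List Int) × List (List Int) × Int) : List Int :=
  let A := x.1; let B := x.2.1; let i := x.2.2
  let row := PySem.List.pyGetD A i []
  let res0 := PySem.List.pyRepeat [(0 : Int)] (PySem.List.pyGetD B 0 []).length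
  (PySem.List.pyRange 0 row.length 1).foldl
    (fun res k =>
      let rk := PySem.List.pyGetD row k 0
      let Bk := PySem.List.pyGetD B k []
      (PySem.List.pyRange 0 res.length 1).foldl
        (fun r j => PySem.List.pySetD r j (PySem.List.pyGetD r j 0 + rk * PySem.List.pyGetD Bk j 0)) res)
    res0

-- ===== PRECONDITION & SPEC =====
-- Pre_ excludes exactly the inputs on which Python A raises (empty B for B[0]; row index i out of
-- range; A's row longer than B's column so scalar_product's b[i] raises; a row of B shorter than
-- len(B[0]) so get_column raises) — EXCEPT that when len(B[0]) == 0 A's loop body never runs and A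
-- returns [] even with an invalid i or an over-long row; those corner inputs, on which B naturally
-- raises, are excluded too.
def Pre_proc_row (x : List (List Int) × List (List Int) × Int) : Prop :=
  x.2.1 ≠ [] ∧ PySem.Raise.InRange x.1.length x.2.2 ∧
  (PySem.List.pyGetD x.1 x.2.2 []).length ≤ x.2.1.length ∧
  ∀ r ∈ x.2.1, (PySem.List.pyGetD x.2.1 0 []).length ≤ r.length
instance (x : List (List Int) × List (List Int) × Int) : Decidable (Pre_proc_row x) := by
  unfold Pre_proc_row; infer_instance

def pvWitness_proc_row : (List (List Int) × List (List Int) × Int) :=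
  ([[1, 2]], [[3], [4]], 0)

def Spec_proc_row (x : List (List Int) × List (List Int) × Int) (out : List Int) : Prop := out = proc_row_alt x
instance (x : List (List Int) × List (List Int) × Int) (out : List Int) : Decidable (Spec_proc_row x out) := by unfold Spec_proc_row; infer_instance

-- ===== CLAIM (what is proved, stated in full; the proofs are below) =====
def Claim_equal_proc_row : Prop := ∀ (x : List (List Int) × List (List Int) × Int), Dom_proc_row x → Pre_proc_row x → Spec_proc_row x (proc_row x)

-- ===== LEMMAS AND PROOFS =====

-- the j-th column value A and B both read: B[k][j] with defaults
def pvCell (B : List (List Int)) (j k : Nat) : Int :=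
  PySem.List.pyGetD (B.getD k []) (j : Int) 0

-- partial dot product of row with column j, over the first t entries of row
def pvS (row : List Int) (B : List (List Int)) (j t : Nat) : Int :=
  ((List.range t).map (fun k => row.getD k 0 * pvCell B j k)).sum

theorem scalar_product_eq (a b : List Int) :
    scalar_product a b = ((List.range a.length).map (fun k => a.getD k 0 * b.getD k 0)).sum := by
  unfold scalar_product
  rw [PySem.List.pyRange_zero_nat, List.foldl_map, PySem.List.foldl_add]
  simp

theorem get_column_eq (B : List (List Int)) (j : Int) :
    get_column B j = (List.range B.length).map (fun k => PySem.List.pyGetD (B.getD k []) j 0) := by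
  unfold get_column
  rw [PySem.List.foldl_append_singleton_eq_map, PySem.List.pyRange_zero_nat, List.map_map]
  simp

theorem colget_eq (B : List (List Int)) (j k : Nat) :
    ((List.range B.length).map (fun t => PySem.List.pyGetD (B.getD t []) (j : Int) 0)).getD k 0
      = pvCell B j k := by
  unfold pvCell
  by_cases h : k < B.length
  · rw [PySem.List.getD_map_range _ _ _ _ h]
  · rw [List.getD_eq_getElem?_getD, List.getElem?_eq_none (by simpa using h)]
    rw [List.getD_eq_getElem?_getD, List.getElem?_eq_none (by omega)]
    simp [PySem.List.pyGetD, PySem.List.pyGet?]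

theorem proc_row_eq (A B : List (List Int)) (i : Int) :
    proc_row (A, B, i) =
      (List.range (PySem.List.pyGetD B 0 []).length).map
        (fun j => pvS (PySem.List.pyGetD A i []) B j (PySem.List.pyGetD A i []).length) := by
  show (PySem.List.pyRange 0 ((PySem.List.pyGetD B 0 []).length : Int) 1).foldl
      (fun res j => res ++ [scalar_product (get_row A i) (get_column B j)]) [] = _
  rw [PySem.List.foldl_append_singleton_eq_map, PySem.List.pyRange_zero_nat, List.map_map]
  simp only [List.nil_append, Function.comp_def]
  apply List.map_congr_left
  intro j _
  rw [get_column_eq, scalar_product_eq]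
  unfold pvS get_row
  congr 1
  apply List.map_congr_left
  intro k _
  rw [colget_eq]

theorem inner_fold (c : Int → Int) (res : List Int) : ∀ (pre : List Int),
      (PySem.List.pyRange (pre.length : Int) ((pre.length : Int) + res.length) 1).foldl
        (fun r j => PySem.List.pySetD r j (PySem.List.pyGetD r j 0 + c j)) (pre ++ res)
      = pre ++ (List.range res.length).map (fun k => res.getD k 0 + c ((pre.length : Int) + k)) := by
  induction res with
  | nil => intro pre; simp [PySem.List.pyRange_one_eq_nil]
  | cons v t ih =>
    intro pre
    have h1 : (pre.length : Int) < (pre.length : Int) + ((v :: t).length : Int) := by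
      simp
    rw [PySem.List.pyRange_one_cons h1]
    simp only [List.foldl_cons]
    have hget : PySem.List.pyGetD (pre ++ v :: t) ((pre.length : Int)) 0 = v := by
      rw [PySem.List.pyGetD_natCast]
      simp [List.getD_eq_getElem?_getD]
    have hset : PySem.List.pySetD (pre ++ v :: t) ((pre.length : Int)) (v + c (pre.length : Int))
        = (pre ++ [v + c (pre.length : Int)]) ++ t := by
      rw [PySem.List.pySetD_natCast]
      rw [List.set_append_right _ _ (le_refl _)]
      simp
    rw [hget, hset]
    have hpre' : ((pre ++ [v + c (pre.length : Int)]).length : Int) = (pre.length : Int) + 1 := by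
      simp
    have hrange : PySem.List.pyRange ((pre.length : Int) + 1) ((pre.length : Int) + ((v :: t).length : Int)) 1
        = PySem.List.pyRange (((pre ++ [v + c (pre.length : Int)]).length : Int))
            ((((pre ++ [v + c (pre.length : Int)]).length : Int)) + (t.length : Int)) 1 := by
      rw [hpre']; congr 1; simp; ring
    rw [hrange, ih]
    simp only [List.length_cons, List.range_succ_eq_map, List.map_cons, List.map_map]
    rw [hpre']
    simp only [List.getD_cons_zero, Nat.cast_zero, add_zero]
    rw [List.append_assoc, List.singleton_append]
    congr 1
    congr 1
    apply List.map_congr_left; intro k _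
    simp only [Function.comp_def, List.getD_cons_succ]
    push_cast; ring_nf

theorem alt_inv (row : List Int) (B : List (List Int)) (m : Nat) (t : Nat) :
    (PySem.List.pyRange 0 (t : Int) 1).foldl
      (fun res k =>
        (PySem.List.pyRange 0 (res.length : Int) 1).foldl
          (fun r j => PySem.List.pySetD r j (PySem.List.pyGetD r j 0 +
            PySem.List.pyGetD row k 0 * PySem.List.pyGetD (PySem.List.pyGetD B k []) j 0)) res)
      ((List.range m).map (fun j => pvS row B j 0))
    = (List.range m).map (fun j => pvS row B j t) := by
  induction t with
  | zero => simp [PySem.List.pyRange_one_eq_nil]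
  | succ t ih =>
    have hc : ((t + 1 : Nat) : Int) = (t : Int) + 1 := by push_cast; ring
    rw [hc, PySem.List.pyRange_one_succ_right (by positivity), List.foldl_append, List.foldl_cons,
        List.foldl_nil, ih]
    have hlen : (((List.range m).map (fun j => pvS row B j t)).length : Int) = (m : Int) := by simp
    rw [hlen]
    have := inner_fold
      (fun j => PySem.List.pyGetD row (t : Int) 0 * PySem.List.pyGetD (PySem.List.pyGetD B (t : Int) []) j 0)
      ((List.range m).map (fun j => pvS row B j t)) []
    simp only [List.length_nil, Nat.cast_zero, zero_add, List.nil_append, List.length_map,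
      List.length_range] at this
    rw [this]
    apply List.map_congr_left
    intro k hk
    rw [PySem.List.getD_map_range _ _ _ _ (List.mem_range.mp hk)]
    unfold pvS
    rw [List.range_succ, List.map_append, List.sum_append]
    simp [pvCell]

theorem proc_row_alt_eq (A B : List (List Int)) (i : Int) :
    proc_row_alt (A, B, i) =
      (List.range (PySem.List.pyGetD B 0 []).length).map
        (fun j => pvS (PySem.List.pyGetD A i []) B j (PySem.List.pyGetD A i []).length) := by
  show (PySem.List.pyRange 0 ((PySem.List.pyGetD A i []).length : Int) 1).foldl
      (fun res k =>
        (PySem.List.pyRange 0 (res.length : Int) 1).foldl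
          (fun r j => PySem.List.pySetD r j (PySem.List.pyGetD r j 0 +
            PySem.List.pyGetD (PySem.List.pyGetD A i []) k 0 *
              PySem.List.pyGetD (PySem.List.pyGetD B k []) j 0)) res)
      (PySem.List.pyRepeat [(0 : Int)] ((PySem.List.pyGetD B 0 []).length : Int)) = _
  have hinit : PySem.List.pyRepeat [(0 : Int)] ((PySem.List.pyGetD B 0 []).length : Int)
      = (List.range (PySem.List.pyGetD B 0 []).length).map
          (fun j => pvS (PySem.List.pyGetD A i []) B j 0) := by
    rw [PySem.List.pyRepeat_singleton]
    simp [pvS, List.map_const']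
  rw [hinit, alt_inv]

-- ===== VERDICT (by name: the statement is the Claim_ definition above) =====
theorem proc_row_spec : Claim_equal_proc_row := by
  intro x _ _
  unfold Spec_proc_row
  obtain ⟨A, B, i⟩ := x
  rw [proc_row_eq, proc_row_alt_eq]
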